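-- pv_equiv track=rewrite | github.com/XyzHuy/-DL-Fine-tuning-coding-model | data/solution/Solution1947.py | maxCompatibilitySum
-- ===== SOURCE A (Python) =====
-- from typing import List
--
-- def maxCompatibilitySum(students: List[List[int]], mentors: List[List[int]]) -> int:
--     def compatibility_score(s, m):
--         return sum(a == b for a, b in zip(s, m))
--
--     def backtrack(student_index, used_mentors):
--         if student_index == len(students):
--             return 0
--
--         max_score = 0
--         for mentor_index in range(len(mentors)):
--             if not used_mentors[mentor_index]:
--                 used_mentors[mentor_index] = True
--                 score = compatibility_score(students[student_index], mentors[mentor_index])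
--                 max_score = max(max_score, score + backtrack(student_index + 1, used_mentors))
--                 used_mentors[mentor_index] = False
--
--         return max_score
--
--     used_mentors = [False] * len(mentors)
--     return backtrack(0, used_mentors)
-- ===== SOURCE B (Python) =====
-- from typing import List
--
-- def popcount(x):
--     c = 0
--     while x:
--         c += x % 2
--         x //= 2
--     return c
--
-- def maxCompatibilitySum(students: List[List[int]], mentors: List[List[int]]) -> int:
--     m = len(mentors)
--     n = len(students)
--     score = [[sum(1 for a, b in zip(s, mt) if a == b) for mt in mentors] for s in students]
--     full = 1 << m
--     dp = [0] * full
--     for mask in range(full - 1, -1, -1):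
--         i = popcount(mask)
--         if n <= i:
--             dp[mask] = 0
--         else:
--             best = 0
--             for j in range(m):
--                 if (mask >> j) % 2 == 0:
--                     best = max(best, score[i][j] + dp[mask | (1 << j)])
--             dp[mask] = best
--     return dp[0]
-- ===== Notes on version B (the rewrite author's own statement) =====
-- stated objective: faster
-- what changed: Replaced A's recursive factorial backtracking over a mutable used-mentor boolean list with a bottom-up iterative DP filling a table indexed by the bitmask of used mentors (masks processed in decreasing order), with all compatibility scores precomputed into a matrix once.
import Mathlib
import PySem

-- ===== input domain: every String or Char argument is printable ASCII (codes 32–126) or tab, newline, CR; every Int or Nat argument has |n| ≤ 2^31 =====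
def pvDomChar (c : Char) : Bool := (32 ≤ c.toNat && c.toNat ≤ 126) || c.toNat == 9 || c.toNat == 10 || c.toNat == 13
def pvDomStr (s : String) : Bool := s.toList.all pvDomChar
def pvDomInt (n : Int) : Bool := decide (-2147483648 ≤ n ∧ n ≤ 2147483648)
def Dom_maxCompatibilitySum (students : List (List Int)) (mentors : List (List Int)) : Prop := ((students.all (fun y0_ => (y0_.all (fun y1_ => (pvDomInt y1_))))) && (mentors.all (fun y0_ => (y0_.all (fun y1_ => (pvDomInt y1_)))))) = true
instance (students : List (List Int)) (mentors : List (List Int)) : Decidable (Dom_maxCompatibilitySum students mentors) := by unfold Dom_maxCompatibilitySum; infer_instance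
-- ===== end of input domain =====

-- B replaces A's recursive factorial backtracking (mutable used-mentor list) by a
-- bottom-up iterative DP over a table indexed by the bitmask of used mentors, with a
-- precomputed score matrix; a timing run measures whether it is faster.

-- ===== PORT A =====
-- sum(a == b for a, b in zip(s, m))
def pvCompatA (s m : List Int) : Int :=
  (s.zip m).foldl (fun acc ab => acc + (if ab.1 == ab.2 then 1 else 0)) 0

-- backtrack(student_index, used_mentors); the remaining suffix of `students`
-- stands for student_index, and `used` is the (immutably threaded) used_mentors
-- list — Python restores the flag after each recursive call, so each call sees the
-- same list it was given.
def pvBacktrackA (mentors : List (List Int)) : List (List Int) → List Bool → Int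
  | [], _ => 0
  | s :: rest, used =>
    (List.range mentors.length).foldl
      (fun maxScore j =>
        if !(used.getD j false) then
          max maxScore (pvCompatA s (mentors.getD j []) + pvBacktrackA mentors rest (used.set j true))
        else maxScore) 0

def maxCompatibilitySum (students : List (List Int)) (mentors : List (List Int)) : Int :=
  pvBacktrackA mentors students (List.replicate mentors.length false)

-- ===== PORT B =====
-- sum(1 for a, b in zip(s, mt) if a == b)
def pvScoreB (s mt : List Int) : Int :=
  (((s.zip mt).filter (fun ab => ab.1 == ab.2)).length : Int)

-- popcount(x): while x: c += x % 2; x //= 2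
def pvPopLoop (x c : Nat) : Nat :=
  if h : x = 0 then c else pvPopLoop (x / 2) (c + x % 2)
termination_by x
decreasing_by exact Nat.div_lt_self (Nat.pos_of_ne_zero h) one_lt_two

def pvPop (x : Nat) : Nat := pvPopLoop x 0

-- one iteration of the `for mask` loop body: dp[mask] = …
def pvStepB (m n : Nat) (score : List (List Int)) (dp : List Int) (mask : Nat) : List Int :=
  let i := pvPop mask
  dp.set mask (if n ≤ i then 0 else
    (List.range m).foldl
      (fun best j =>
        if (mask >>> j) % 2 == 0 then
          max best ((score.getD i []).getD j 0 + dp.getD (mask ||| (1 <<< j)) 0)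
        else best) 0)

def maxCompatibilitySum_alt (students : List (List Int)) (mentors : List (List Int)) : Int :=
  let m := mentors.length
  let n := students.length
  let score := students.map (fun s => mentors.map (fun mt => pvScoreB s mt))
  let full := 1 <<< m
  -- range(full - 1, -1, -1) visits full-1, …, 1, 0, i.e. (List.range full).reverse; exact
  let dp := (List.range full).reverse.foldl (pvStepB m n score) (List.replicate full 0)
  dp.getD 0 0

-- ===== PRECONDITION & SPEC =====
def Spec_maxCompatibilitySum (students : List (List Int)) (mentors : List (List Int)) (out : Int) : Prop := out = maxCompatibilitySum_alt students mentors
instance (students : List (List Int)) (mentors : List (List Int)) (out : Int) : Decidable (Spec_maxCompatibilitySum students mentors out) := by unfold Spec_maxCompatibilitySum; infer_instance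

-- ===== CLAIM (what is proved, stated in full; the proofs are below) =====
def Claim_equal_maxCompatibilitySum : Prop := ∀ (students : List (List Int)) (mentors : List (List Int)), Dom_maxCompatibilitySum students mentors → Spec_maxCompatibilitySum students mentors (maxCompatibilitySum students mentors)

-- ===== LEMMAS AND PROOFS =====

-- proof-only intermediate: the value of A's backtracking phrased on the score matrix
-- (rows = remaining students' score rows, mask = bitmask of used mentors)
def pvBest (m : Nat) : List (List Int) → Nat → Int
  | [], _ => 0
  | row :: rest, mask =>
    (List.range m).foldl
      (fun r j =>
        if !(mask.testBit j) then
          max r (row.getD j 0 + pvBest m rest (mask ||| (1 <<< j)))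
        else r) 0

theorem pvFoldCount (l : List (Int × Int)) : ∀ c : Int,
    l.foldl (fun acc ab => acc + (if ab.1 == ab.2 then 1 else 0)) c
      = c + ((l.filter (fun ab => ab.1 == ab.2)).length : Int) := by
  induction l with
  | nil => intro c; simp
  | cons ab l ih =>
    intro c
    by_cases h : ab.1 == ab.2
    · rw [List.foldl_cons, ih, List.filter_cons, if_pos h]
      simp at h
      simp [h]; omega
    · rw [List.foldl_cons, ih, List.filter_cons, if_neg h]
      simp at h
      simp [h]

theorem pvCompat_eq_score (s mt : List Int) : pvCompatA s mt = pvScoreB s mt := by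
  unfold pvCompatA pvScoreB
  rw [pvFoldCount]; ring

theorem pvBacktrack_eq_pvBest (mentors : List (List Int)) (rest : List (List Int))
    (used : List Bool) (mask : Nat)
    (hlen : used.length = mentors.length)
    (hinv : ∀ j, used.getD j false = mask.testBit j) :
    pvBacktrackA mentors rest used
      = pvBest mentors.length (rest.map (fun s => mentors.map (fun mt => pvScoreB s mt))) mask := by
  induction rest generalizing used mask with
  | nil => simp [pvBacktrackA, pvBest]
  | cons s rest ih =>
    simp only [pvBacktrackA, List.map_cons, pvBest]
    apply PySem.List.foldl_congr_mem
    intro acc j hj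
    have hjm : j < mentors.length := List.mem_range.mp hj
    rw [hinv j]
    by_cases hb : mask.testBit j
    · simp [hb]
    · simp only [hb, Bool.not_false]
      have hinv2 : ∀ k, (used.set j true).getD k false = (mask ||| (1 <<< j)).testBit k := by
        intro k
        have hset : (used.set j true).getD k false =
            if k = j then true else used.getD k false := by
          rw [List.getD_eq_getElem?_getD, List.getElem?_set]
          by_cases hkj : k = j
          · subst hkj
            simp [hlen.symm ▸ hjm]
          · simp [hkj, (show ¬ j = k from fun h => hkj h.symm), List.getD_eq_getElem?_getD]
        rw [hset]
        have hshift : (1 <<< j : Nat) = 2 ^ j := by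
          simp [Nat.shiftLeft_eq]
        by_cases hkj : k = j
        · subst hkj
          rw [if_pos rfl]
          simp [Nat.testBit_or, hshift, Nat.testBit_two_pow_self]
        · rw [if_neg hkj, hinv k]
          simp [Nat.testBit_or, hshift, Nat.testBit_two_pow_of_ne (fun h => hkj h.symm)]
      have hrow : (List.map (fun mt => pvScoreB s mt) mentors).getD j 0
          = pvCompatA s (mentors.getD j []) := by
        rw [List.getD_eq_getElem?_getD, List.getElem?_map, List.getD_eq_getElem?_getD,
          List.getElem?_eq_getElem hjm]
        simp [pvCompat_eq_score]
      rw [hrow, ih (used.set j true) (mask ||| (1 <<< j)) (by simpa using hlen) hinv2]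

theorem pvPopLoop_acc (x : Nat) : ∀ c : Nat, pvPopLoop x c = c + pvPopLoop x 0 := by
  induction x using Nat.strong_induction_on with
  | _ x ih =>
    intro c
    by_cases h : x = 0
    · subst h; simp [pvPopLoop]
    · conv_lhs => rw [pvPopLoop]
      conv_rhs => rw [pvPopLoop]
      rw [dif_neg h, dif_neg h,
        ih (x / 2) (Nat.div_lt_self (Nat.pos_of_ne_zero h) one_lt_two) (c + x % 2),
        ih (x / 2) (Nat.div_lt_self (Nat.pos_of_ne_zero h) one_lt_two) (0 + x % 2)]
      omega

theorem pvPop_rec (x : Nat) : pvPop x = x % 2 + pvPop (x / 2) := by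
  by_cases h : x = 0
  · subst h; simp [pvPop, pvPopLoop]
  · unfold pvPop
    conv_lhs => rw [pvPopLoop]
    rw [dif_neg h, pvPopLoop_acc]
    omega

theorem pvPop_or (j : Nat) : ∀ t : Nat, t.testBit j = false →
    pvPop (t ||| 2 ^ j) = pvPop t + 1 := by
  induction j with
  | zero =>
    intro t hb
    have hmod : t % 2 = 0 := by
      simp [Nat.testBit_zero] at hb; omega
    have hmod1 : (t ||| 1) % 2 = 1 := by
      have h0 : (t ||| 1).testBit 0 = true := by
        simp
      rw [Nat.testBit_zero] at h0
      exact of_decide_eq_true h0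
    have hdiv : (t ||| 1) / 2 = t / 2 := by
      apply Nat.eq_of_testBit_eq
      intro i
      rw [← Nat.testBit_succ, Nat.testBit_or]
      have h1 : Nat.testBit 1 (i + 1) = false := by
        have : (1 : Nat) = 2 ^ 0 := rfl
        rw [this, Nat.testBit_two_pow]
        simp
      rw [h1, Bool.or_false, Nat.testBit_succ]
    rw [pvPop_rec (t ||| 2 ^ 0), pvPop_rec t]
    simp only [pow_zero]
    rw [hmod1, hdiv]
    omega
  | succ j ih =>
    intro t hb
    have hb2 : (t / 2).testBit j = false := by
      rwa [← Nat.testBit_succ]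
    have hne : (t ||| 2 ^ (j + 1)) ≠ 0 := by
      intro h0
      have : (t ||| 2 ^ (j + 1)).testBit (j + 1) = true := by
        simp [Nat.testBit_or, Nat.testBit_two_pow_self]
      rw [h0] at this
      simp at this
    have hmod : (t ||| 2 ^ (j + 1)) % 2 = t % 2 := by
      have h0 : (t ||| 2 ^ (j + 1)).testBit 0 = t.testBit 0 := by
        rw [Nat.testBit_or, Nat.testBit_two_pow]
        simp
      rw [Nat.testBit_zero, Nat.testBit_zero] at h0
      have h1 := decide_eq_decide.mp h0
      omega
    have hdiv : (t ||| 2 ^ (j + 1)) / 2 = t / 2 ||| 2 ^ j := by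
      apply Nat.eq_of_testBit_eq
      intro i
      rw [← Nat.testBit_succ, Nat.testBit_or, Nat.testBit_or]
      congr 1
      · exact Nat.testBit_succ t i
      · rw [Nat.testBit_two_pow, Nat.testBit_two_pow]
        simp
    rw [pvPop_rec (t ||| 2 ^ (j + 1)), hmod, hdiv, ih (t / 2) hb2, pvPop_rec t]
    omega

theorem pvStep_val (m : Nat) (score : List (List Int)) (dp : List Int) (t : Nat)
    (ht : t < 2 ^ m)
    (hdp : ∀ k, t < k → k < 2 ^ m → dp.getD k 0 = pvBest m (score.drop (pvPop k)) k) :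
    (if score.length ≤ pvPop t then (0 : Int) else
      (List.range m).foldl
        (fun (best : Int) j =>
          if (t >>> j) % 2 == 0 then
            max best ((score.getD (pvPop t) []).getD j 0 + dp.getD (t ||| (1 <<< j)) 0)
          else best) 0)
      = pvBest m (score.drop (pvPop t)) t := by
  by_cases hle : score.length ≤ pvPop t
  · rw [if_pos hle, List.drop_eq_nil_of_le hle]
    simp [pvBest]
  · rw [if_neg hle]
    have hlt : pvPop t < score.length := Nat.lt_of_not_le hle
    rw [List.drop_eq_getElem_cons hlt]
    simp only [pvBest]
    apply PySem.List.foldl_congr_mem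
    intro acc j hj
    have hjm : j < m := List.mem_range.mp hj
    have hcond : ((t >>> j) % 2 == 0) = !t.testBit j := by
      rw [Nat.shiftRight_eq_div_pow, Nat.testBit_eq_decide_div_mod_eq]
      rcases Nat.mod_two_eq_zero_or_one (t / 2 ^ j) with h | h <;> simp [h]
    rw [hcond]
    by_cases hb : t.testBit j
    · simp [hb]
    · have hbf : t.testBit j = false := by simpa using hb
      simp only [hbf, Bool.not_false, if_pos]
      have hsh : (1 <<< j : Nat) = 2 ^ j := by simp [Nat.shiftLeft_eq]
      have hlt2 : t ||| 2 ^ j < 2 ^ m :=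
        Nat.or_lt_two_pow ht (Nat.pow_lt_pow_right one_lt_two hjm)
      have hgt : t < t ||| 2 ^ j := by
        refine Nat.lt_of_le_of_ne Nat.left_le_or ?_
        intro he
        have hT : (t ||| 2 ^ j).testBit j = true := by
          simp [Nat.testBit_or, Nat.testBit_two_pow_self]
        rw [← he, hbf] at hT
        exact Bool.false_ne_true hT
      have hrow : score.getD (pvPop t) [] = score[pvPop t] := by
        rw [List.getD_eq_getElem?_getD, List.getElem?_eq_getElem hlt]
        rfl
      rw [hsh, hdp (t ||| 2 ^ j) hgt hlt2, pvPop_or j t hbf, hrow]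

theorem pvFill (m : Nat) (score : List (List Int)) :
    ∀ t, t ≤ 2 ^ m → ∀ dp : List Int, dp.length = 2 ^ m →
    (∀ k, t ≤ k → k < 2 ^ m → dp.getD k 0 = pvBest m (score.drop (pvPop k)) k) →
    ((List.range t).reverse.foldl (pvStepB m score.length score) dp).length = 2 ^ m ∧
    ∀ k, k < 2 ^ m →
      ((List.range t).reverse.foldl (pvStepB m score.length score) dp).getD k 0
        = pvBest m (score.drop (pvPop k)) k := by
  intro t
  induction t with
  | zero =>
    intro _ dp hlen hdp
    simp only [List.range_zero, List.reverse_nil, List.foldl_nil]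
    exact ⟨hlen, fun k hk => hdp k (Nat.zero_le k) hk⟩
  | succ t ih =>
    intro hle dp hlen hdp
    have hts : t < 2 ^ m := by omega
    rw [List.range_succ, List.reverse_append]
    simp only [List.reverse_cons, List.reverse_nil, List.nil_append, List.singleton_append,
      List.foldl_cons]
    apply ih (by omega)
    · simp [pvStepB, hlen]
    · intro k hk hk2
      by_cases hkt : k = t
      · subst hkt
        simp only [pvStepB]
        rw [List.getD_eq_getElem?_getD, List.getElem?_set_self (by omega : k < dp.length)]
        simp only [Option.getD_some]
        exact pvStep_val m score dp k hts (fun k' hk' hk2' => hdp k' (by omega) hk2')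
      · simp only [pvStepB]
        rw [List.getD_eq_getElem?_getD, List.getElem?_set_ne (fun h => hkt h.symm),
          ← List.getD_eq_getElem?_getD]
        exact hdp k (by omega) hk2

theorem alt_eq_pvBest (students mentors : List (List Int)) :
    maxCompatibilitySum_alt students mentors
      = pvBest mentors.length (students.map (fun s => mentors.map (fun mt => pvScoreB s mt))) 0 := by
  unfold maxCompatibilitySum_alt
  simp only []
  have hfull : (1 <<< mentors.length : Nat) = 2 ^ mentors.length := by
    simp [Nat.shiftLeft_eq]
  have hn : students.length
      = (students.map (fun s => mentors.map (fun mt => pvScoreB s mt))).length := by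
    simp
  rw [hfull, hn]
  have h := pvFill mentors.length (students.map (fun s => mentors.map (fun mt => pvScoreB s mt)))
    (2 ^ mentors.length) (le_refl _)
    (List.replicate (2 ^ mentors.length) 0) (by simp)
    (fun k hk hk2 => absurd hk2 (by omega))
  have h0 := h.2 0 (by positivity)
  rw [h0]
  have hp0 : pvPop 0 = 0 := by
    unfold pvPop
    rw [pvPopLoop]
    simp
  rw [hp0, List.drop_zero]

-- ===== VERDICT (by name: the statement is the Claim_ definition above) =====
theorem maxCompatibilitySum_spec : Claim_equal_maxCompatibilitySum := by
  intro students mentors _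
  unfold Spec_maxCompatibilitySum maxCompatibilitySum
  rw [alt_eq_pvBest]
  exact pvBacktrack_eq_pvBest mentors students (List.replicate mentors.length false) 0
    (by simp) (by simp)
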